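-- pv_equiv track=rewrite | github.com/DharmikPrajapati23/Compiler_Design | first_follow.py | tokenize_production
-- ===== SOURCE A (Python) =====
-- def tokenize_production(prod, nonterminals):
--     """
--     Longest-match tokenizer using known nonterminals (handles primes like A').
--     Any unmatched character is treated as a single-character terminal.
--     """
--     if prod == "ε":
--         return ["ε"]
--     tokens = []
--     i = 0
--     nts_sorted = sorted(nonterminals, key=len, reverse=True)
--     while i < len(prod):
--         matched = False
--         for nt in nts_sorted:
--             L = len(nt)
--             if prod[i:i+L] == nt:
--                 tokens.append(nt)
--                 i += L
--                 matched = True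
--                 break
--         if not matched:
--             tokens.append(prod[i])
--             i += 1
--     return tokens
-- ===== SOURCE B (Python) =====
-- def tokenize_production(prod, nonterminals):
--     """
--     Longest-match tokenizer driven by candidate LENGTHS instead of candidates:
--     put the nonterminals in a hash set once, record the maximal length, and at
--     each position probe the substrings prod[i:i+L] for L from that maximum down
--     to 1 -- the first one found in the set is the longest match (a substring of
--     a fixed length at a fixed position is unique, so no tie-breaking exists).
--     The per-position scan over the whole nonterminal list disappears.
--     """
--     if prod == "ε":
--         return ["ε"]
--     nt_set = set(nonterminals)
--     max_len = 0
--     for nt in nonterminals: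
--         max_len = max(max_len, len(nt))
--     tokens = []
--     i = 0
--     n = len(prod)
--     while i < n:
--         for L in range(min(max_len, n - i), 0, -1):
--             if prod[i:i+L] in nt_set:
--                 tokens.append(prod[i:i+L])
--                 i += L
--                 break
--         else:
--             tokens.append(prod[i])
--             i += 1
--     return tokens
-- ===== Notes on version B (the rewrite author's own statement) =====
-- stated objective: faster
-- what changed: B replaces A's per-position scan over the length-sorted nonterminal list by a hash-set index: the nonterminals go into a set once, and each position probes substrings of length max_len down to 1 for membership, so the inner loop is over candidate lengths, not candidates; Pre_ excludes nonterminal lists containing the empty string, on which A can loop forever because matching '' advances the position by zero.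
-- outside the precondition, e.g. on tokenize_production('A', ['', 'B']): A does not finish within the time limit, B returns ['A']; on tokenize_production('A', ['A', '']): A returns ['A'], B returns ['A']
import Mathlib
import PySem

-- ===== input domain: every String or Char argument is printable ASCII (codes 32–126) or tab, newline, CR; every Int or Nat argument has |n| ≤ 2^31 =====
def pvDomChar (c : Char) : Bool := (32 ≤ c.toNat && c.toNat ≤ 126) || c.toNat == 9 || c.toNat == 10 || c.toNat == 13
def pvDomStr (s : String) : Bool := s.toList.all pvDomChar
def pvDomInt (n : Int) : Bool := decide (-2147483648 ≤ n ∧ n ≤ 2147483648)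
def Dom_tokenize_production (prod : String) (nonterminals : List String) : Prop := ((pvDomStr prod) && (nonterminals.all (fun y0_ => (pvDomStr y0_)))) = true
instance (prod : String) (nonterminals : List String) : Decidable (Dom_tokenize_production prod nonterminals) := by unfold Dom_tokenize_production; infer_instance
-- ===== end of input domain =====

-- B replaces A's per-position scan over the length-sorted nonterminal list by a
-- hash-set membership probe on the substrings prod[i:i+L], L from max_len down
-- to 1 (a substring of fixed length at a fixed position is unique, so the first
-- probe that hits is the longest match); objective: faster.

-- ===== PORT A =====
-- while-loop of A: fuel = len(prod) bounds the iterations (inside Pre_ every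
-- iteration advances i by at least 1, so the fuel guard is never hit there).
def pvGoA (cs : List Char) (nts : List String) (tokens : List String) (i : Nat) : Nat → List String
  | 0 => tokens
  | fuel+1 =>
    if h : i < cs.length then
      -- 'for nt in nts_sorted: if prod[i:i+L] == nt: … break' is find?
      match nts.find? (fun nt => PySem.List.slice cs (some (i:Int)) (some ((i:Int) + (nt.toList.length : Int))) == nt.toList) with
      | some nt => pvGoA cs nts (tokens ++ [nt]) (i + nt.toList.length) fuel
      | none => pvGoA cs nts (tokens ++ [String.ofList [cs[i]]]) (i+1) fuel
    else tokens

def tokenize_production (prod : String) (nonterminals : List String) : List String :=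
  if prod = "ε" then ["ε"]
  else
    pvGoA prod.toList
      (PySem.List.sorted nonterminals (fun nt => nt.toList.length) true)
      [] 0 prod.toList.length

-- ===== PORT B =====
-- inner 'for L in range(min(max_len, n-i), 0, -1): if prod[i:i+L] in nt_set: … break'
def pvTryL (cs : List Char) (ntset : PySem.Set String) (i : Nat) : Nat → Option Nat
  | 0 => none
  | L+1 =>
    if PySem.Set.contains ntset (String.ofList (PySem.List.slice cs (some (i:Int)) (some ((i:Int) + ((L+1 : Nat) : Int))))) then
      some (L+1)
    else pvTryL cs ntset i L

def pvGoB (cs : List Char) (ntset : PySem.Set String) (maxL : Nat) (tokens : List String) (i : Nat) : Nat → List String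
  | 0 => tokens
  | fuel+1 =>
    if h : i < cs.length then
      match pvTryL cs ntset i (min maxL (cs.length - i)) with
      | some L => pvGoB cs ntset maxL (tokens ++ [String.ofList (PySem.List.slice cs (some (i:Int)) (some ((i:Int) + (L : Int))))]) (i+L) fuel
      | none => pvGoB cs ntset maxL (tokens ++ [String.ofList [cs[i]]]) (i+1) fuel
    else tokens

def tokenize_production_alt (prod : String) (nonterminals : List String) : List String :=
  if prod = "ε" then ["ε"]
  else
    pvGoB prod.toList (PySem.Set.ofList nonterminals)
      (nonterminals.foldl (fun m nt => max m nt.toList.length) 0)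
      [] 0 prod.toList.length

-- ===== PRECONDITION & SPEC =====
-- Pre_ excludes nonterminal lists containing the empty string: there A can loop
-- forever (matching "" advances i by zero), and where it happens to return, the
-- value is an accident of which other nonterminal matched first.
def Pre_tokenize_production (prod : String) (nonterminals : List String) : Prop :=
  "" ∉ nonterminals
instance (prod : String) (nonterminals : List String) : Decidable (Pre_tokenize_production prod nonterminals) := by unfold Pre_tokenize_production; infer_instance

def pvWitness_tokenize_production : String × List String := ("AaB", ["A", "A'"])

def Spec_tokenize_production (prod : String) (nonterminals : List String) (out : List String) : Prop := out = tokenize_production_alt prod nonterminals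
instance (prod : String) (nonterminals : List String) (out : List String) : Decidable (Spec_tokenize_production prod nonterminals out) := by unfold Spec_tokenize_production; infer_instance

-- ===== CLAIM (what is proved, stated in full; the proofs are below) =====
def Claim_equal_tokenize_production : Prop := ∀ (prod : String) (nonterminals : List String), Dom_tokenize_production prod nonterminals → Pre_tokenize_production prod nonterminals → Spec_tokenize_production prod nonterminals (tokenize_production prod nonterminals)

-- ===== LEMMAS AND PROOFS =====

-- A's slice test is exactly "nt is a prefix of the rest of prod"
theorem pvPredA_eq (cs : List Char) (i : Nat) (nt : String) :
    (PySem.List.slice cs (some (i:Int)) (some ((i:Int) + (nt.toList.length : Int))) == nt.toList)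
      = nt.toList.isPrefixOf (cs.drop i) := by
  rw [PySem.List.slice_natCast_add]
  rw [Bool.eq_iff_iff]
  simp only [beq_iff_eq, List.isPrefixOf_iff_prefix, List.prefix_iff_eq_take]
  exact eq_comm

-- in a length-descending list, the first match has maximal length among matches
theorem pvFind_max {p : String → Bool} :
    ∀ {l : List String} {a : String},
      l.Pairwise (fun x y => y.toList.length ≤ x.toList.length) →
      l.find? p = some a → ∀ b ∈ l, p b = true → b.toList.length ≤ a.toList.length := by
  intro l
  induction l with
  | nil => intro a _ h; simp at h
  | cons x xs ih =>
    intro a hpw hfind b hb hpb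
    rcases List.pairwise_cons.mp hpw with ⟨hx, hxs⟩
    by_cases hpx : p x = true
    · rw [List.find?_cons_of_pos hpx] at hfind
      injection hfind with hxa
      subst hxa
      rcases List.mem_cons.mp hb with hb | hb
      · subst hb; exact Nat.le_refl _
      · exact hx b hb
    · simp only [List.find?_cons, hpx] at hfind
      rcases List.mem_cons.mp hb with hb | hb
      · subst hb; exact absurd hpb hpx
      · exact ih hxs hfind b hb hpb

-- B's probe loop returns none when no length in 1..bound hits the set
theorem pvTryL_eq_none (cs : List Char) (s : PySem.Set String) (i : Nat) :
    ∀ (B : Nat),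
      (∀ L, 1 ≤ L → L ≤ B →
        PySem.Set.contains s (String.ofList ((cs.drop i).take L)) = false) →
      pvTryL cs s i B = none := by
  intro B
  induction B with
  | zero => intro _; rfl
  | succ n ih =>
    intro h
    rw [pvTryL]
    rw [PySem.List.slice_natCast_add]
    rw [h (n+1) (Nat.succ_le_succ (Nat.zero_le n)) (Nat.le_refl _)]
    simp only [Bool.false_eq_true, if_false]
    exact ih (fun L h1 h2 => h L h1 (Nat.le_succ_of_le h2))

-- B's probe loop returns the first (largest) hitting length
theorem pvTryL_eq_some (cs : List Char) (s : PySem.Set String) (i : Nat) (L0 : Nat) :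
    ∀ (B : Nat), 1 ≤ L0 → L0 ≤ B →
      PySem.Set.contains s (String.ofList ((cs.drop i).take L0)) = true →
      (∀ L, L0 < L → L ≤ B →
        PySem.Set.contains s (String.ofList ((cs.drop i).take L)) = false) →
      pvTryL cs s i B = some L0 := by
  intro B
  induction B with
  | zero => intro h1 h2; omega
  | succ n ih =>
    intro h1 h2 hq hno
    rw [pvTryL]
    rw [PySem.List.slice_natCast_add]
    by_cases he : L0 = n+1
    · subst he
      rw [hq]
      simp
    · have hlt : L0 ≤ n := by omega
      rw [hno (n+1) (by omega) (Nat.le_refl _)]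
      simp only [Bool.false_eq_true, if_false]
      exact ih h1 hlt hq (fun L ha hb => hno L ha (Nat.le_succ_of_le hb))

-- the fold computes an upper bound on all nonterminal lengths
theorem pvMaxL_acc_le :
    ∀ (l : List String) (m : Nat), m ≤ l.foldl (fun m nt => max m nt.toList.length) m := by
  intro l
  induction l with
  | nil => intro m; exact Nat.le_refl _
  | cons x xs ih =>
    intro m
    rw [List.foldl_cons]
    exact Nat.le_trans (Nat.le_max_left _ _) (ih _)

theorem pvMaxL_ge :
    ∀ (l : List String) (m : Nat) (nt : String), nt ∈ l →
      nt.toList.length ≤ l.foldl (fun m nt => max m nt.toList.length) m := by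
  intro l
  induction l with
  | nil => intro m nt h; simp at h
  | cons x xs ih =>
    intro m nt h
    rw [List.foldl_cons]
    rcases List.mem_cons.mp h with h | h
    · subst h
      exact Nat.le_trans (Nat.le_max_right _ _) (pvMaxL_acc_le xs _)
    · exact ih _ nt h

-- per position: if A finds no match, none of B's probes hits the set
theorem pvPos_none (cs : List Char) (nts : List String) (i : Nat)
    (hfind : (PySem.List.sorted nts (fun nt => nt.toList.length) true).find?
        (fun nt => PySem.List.slice cs (some (i:Int)) (some ((i:Int) + (nt.toList.length : Int))) == nt.toList) = none)
    (bound : Nat) :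
    pvTryL cs (PySem.Set.ofList nts) i bound = none := by
  apply pvTryL_eq_none
  intro L h1 h2
  by_contra hc
  have hcT : PySem.Set.contains (PySem.Set.ofList nts)
      (String.ofList ((cs.drop i).take L)) = true := by
    cases hb : PySem.Set.contains (PySem.Set.ofList nts) (String.ofList ((cs.drop i).take L))
    · exact absurd hb hc
    · rfl
  have hmem : String.ofList ((cs.drop i).take L) ∈ nts :=
    (PySem.Set.mem_ofList _ _).mp ((PySem.Set.contains_iff _ _).mp hcT)
  have hms : String.ofList ((cs.drop i).take L)
      ∈ PySem.List.sorted nts (fun nt => nt.toList.length) true :=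
    (PySem.List.mem_sorted _ _ _ _).mpr hmem
  have := List.find?_eq_none.mp hfind _ hms
  rw [pvPredA_eq] at this
  apply this
  rw [String.toList_ofList]
  exact List.isPrefixOf_iff_prefix.mpr (List.take_prefix _ _)

-- per position: A's first match in the length-sorted list is exactly B's longest probe hit
theorem pvPos_some (cs : List Char) (nts : List String) (hne : "" ∉ nts) (i : Nat) (a : String)
    (hfind : (PySem.List.sorted nts (fun nt => nt.toList.length) true).find?
        (fun nt => PySem.List.slice cs (some (i:Int)) (some ((i:Int) + (nt.toList.length : Int))) == nt.toList) = some a) :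
    pvTryL cs (PySem.Set.ofList nts) i
        (min (nts.foldl (fun m nt => max m nt.toList.length) 0) (cs.length - i)) = some a.toList.length
    ∧ String.ofList ((cs.drop i).take a.toList.length) = a := by
  have ha_mem : a ∈ nts :=
    (PySem.List.mem_sorted _ _ _ _).mp (List.mem_of_find?_eq_some hfind)
  have hpa : a.toList.isPrefixOf (cs.drop i) = true := by
    have := List.find?_some hfind
    rwa [pvPredA_eq] at this
  have hpre : a.toList <+: cs.drop i := List.isPrefixOf_iff_prefix.mp hpa
  have htake : (cs.drop i).take a.toList.length = a.toList :=
    (List.prefix_iff_eq_take.mp hpre).symm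
  have hn1 : 1 ≤ a.toList.length := by
    rcases Nat.eq_zero_or_pos a.toList.length with h0 | h0
    · exfalso
      have : a = "" := by
        have : a.toList = [] := List.eq_nil_of_length_eq_zero h0
        have h2 : a.toList = ("" : String).toList := by simpa using this
        exact String.toList_inj.mp h2
      exact hne (this ▸ ha_mem)
    · exact h0
  have hmax : a.toList.length ≤ nts.foldl (fun m nt => max m nt.toList.length) 0 :=
    pvMaxL_ge nts 0 a ha_mem
  have hrem : a.toList.length ≤ cs.length - i := by
    have := hpre.length_le
    simpa [List.length_drop] using this
  have hbound : a.toList.length ≤ min (nts.foldl (fun m nt => max m nt.toList.length) 0) (cs.length - i) :=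
    le_min hmax hrem
  refine ⟨?_, by rw [htake, String.ofList_toList]⟩
  apply pvTryL_eq_some cs _ i a.toList.length _ hn1 hbound
  · rw [htake, String.ofList_toList]
    exact (PySem.Set.contains_iff _ _).mpr ((PySem.Set.mem_ofList _ _).mpr ha_mem)
  · intro L hLgt hLle
    by_contra hc
    have hcT : PySem.Set.contains (PySem.Set.ofList nts)
        (String.ofList ((cs.drop i).take L)) = true := by
      cases hb : PySem.Set.contains (PySem.Set.ofList nts) (String.ofList ((cs.drop i).take L))
      · exact absurd hb hc
      · rfl
    have hmem : String.ofList ((cs.drop i).take L) ∈ nts :=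
      (PySem.Set.mem_ofList _ _).mp ((PySem.Set.contains_iff _ _).mp hcT)
    have hms : String.ofList ((cs.drop i).take L)
        ∈ PySem.List.sorted nts (fun nt => nt.toList.length) true :=
      (PySem.List.mem_sorted _ _ _ _).mpr hmem
    have hLrem : L ≤ (cs.drop i).length := by
      rw [List.length_drop]
      exact Nat.le_trans hLle (Nat.min_le_right _ _)
    have hlen : (String.ofList ((cs.drop i).take L)).toList.length = L := by
      rw [String.toList_ofList, List.length_take]
      omega
    have hple := pvFind_max
      (PySem.List.sorted_pairwise_rev nts (fun nt => nt.toList.length)) hfind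
      (String.ofList ((cs.drop i).take L)) hms ?_
    · rw [hlen] at hple
      omega
    · rw [pvPredA_eq, String.toList_ofList]
      exact List.isPrefixOf_iff_prefix.mpr (List.take_prefix _ _)

theorem pvGo_eq (cs : List Char) (nts : List String) (hne : "" ∉ nts) :
    ∀ (fuel i : Nat) (tokens : List String),
      pvGoA cs (PySem.List.sorted nts (fun nt => nt.toList.length) true) tokens i fuel
        = pvGoB cs (PySem.Set.ofList nts) (nts.foldl (fun m nt => max m nt.toList.length) 0) tokens i fuel := by
  intro fuel
  induction fuel with
  | zero => intro i tokens; rfl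
  | succ n ih =>
    intro i tokens
    rw [pvGoA, pvGoB]
    by_cases h : i < cs.length
    · simp only [h, dif_pos]
      cases hfind : (PySem.List.sorted nts (fun nt => nt.toList.length) true).find?
          (fun nt => PySem.List.slice cs (some (i:Int)) (some ((i:Int) + (nt.toList.length : Int))) == nt.toList) with
      | none =>
        rw [pvPos_none cs nts i hfind]
        dsimp only
        exact ih (i+1) _
      | some a =>
        obtain ⟨htry, htok⟩ := pvPos_some cs nts hne i a hfind
        rw [htry]
        dsimp only
        rw [PySem.List.slice_natCast_add, htok]
        exact ih _ _
    · simp [h]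

-- ===== VERDICT (by name: the statement is the Claim_ definition above) =====
theorem tokenize_production_spec : Claim_equal_tokenize_production := by
  intro prod nts _ hpre
  unfold Spec_tokenize_production tokenize_production tokenize_production_alt
  by_cases h : prod = "ε"
  · simp [h]
  · simp only [h, if_false]
    exact pvGo_eq prod.toList nts hpre _ 0 []
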